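-- pv_equiv track=rewrite | github.com/hughjph/MathsExercises | problem2.py | quotient_remainder
-- ===== SOURCE A (Python) =====
-- def quotient_remainder(number, new_base):
--     number = [int(x) for x in str(number)]
--     quotient_array = []
--     remainder = 0
--
--     for i in range(len(number)):
--         count = 0
--         while number[i] >= new_base:
--             number[i] -= new_base
--             count += 1
--
--         if i == (len(number) - 1):
--             remainder = number[i]
--             quotient_array.append(count)
--         else:
--             number[i + 1] = int(str(number[i]) + str(number[i + 1]))
--             quotient_array.append(count)
--
--     quotient = 0
--
--     for i in range(len(quotient_array)):
--         quotient = quotient * 10 + quotient_array[i]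
--
--     return quotient, remainder
-- ===== SOURCE B (Python) =====
-- def quotient_remainder(number, new_base):
--     value = 0
--     for x in str(number):
--         value = value * 10 + int(x)
--     return divmod(value, new_base)
-- ===== Notes on version B (the rewrite author's own statement) =====
-- stated objective: simpler
-- what changed: Replaces A's hand-rolled long division (per-digit repeated subtraction, carry re-built via int(str(a)+str(b)), quotient digits accumulated in an array and folded) by a single left-to-right parse fold value = value*10 + int(x) followed by one divmod(value, new_base); per-character int() is kept so negative input still raises ValueError like A.
import Mathlib
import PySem

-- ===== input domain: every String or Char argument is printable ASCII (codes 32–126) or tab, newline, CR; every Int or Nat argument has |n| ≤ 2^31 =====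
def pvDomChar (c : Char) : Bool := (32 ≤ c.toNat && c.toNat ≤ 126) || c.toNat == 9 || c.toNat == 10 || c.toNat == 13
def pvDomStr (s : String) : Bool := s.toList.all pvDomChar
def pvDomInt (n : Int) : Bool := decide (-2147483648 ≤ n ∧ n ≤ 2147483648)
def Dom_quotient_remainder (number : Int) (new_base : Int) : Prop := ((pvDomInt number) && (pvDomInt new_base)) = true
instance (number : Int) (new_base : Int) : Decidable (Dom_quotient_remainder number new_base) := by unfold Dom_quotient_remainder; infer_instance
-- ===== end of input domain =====

-- B replaces A's hand-rolled decimal long division by "parse the digits back into the value,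
-- then one divmod" — a simpler single fold (return value only; no argument is mutated).


-- ===== PORT A =====

-- int(x) for a single character x (both Pythons apply int() to one character at a time).
-- Python raises ValueError where ofStr? is none; those inputs (number < 0) are outside Pre_.
def pvDigitInt (c : Char) : Int := (PySem.Int.ofStr? (String.ofList [c])).getD 0

-- the inner `while number[i] >= new_base: number[i] -= new_base; count += 1`;
-- returns (final number[i], count).  The extra `0 < nb` in the guard only makes the
-- recursion total: for nb ≤ 0 Python's loop never terminates, and Pre_ excludes that.
def pvWhileA (v : Int) (nb : Int) : Int × Int :=
  if h : nb ≤ v ∧ 0 < nb then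
    let p := pvWhileA (v - nb) nb
    (p.1, p.2 + 1)
  else (v, 0)
termination_by v.toNat
decreasing_by omega

-- Python's  int(str(a) + str(b))  in A's carry step.  Exact for 0 ≤ a and 0 ≤ b ≤ 9 — the
-- only values reaching it under Pre_ (a is what the subtraction loop left of a cell, b an
-- original decimal digit of the nonnegative number): str(a)+str(b) is then a string of
-- decimal digits whose int() value is a*10 + b.  Ported by hand as that arithmetic value
-- (PySem offers no evaluation lemma for int() applied to str-concatenations).
def pvConcatInt (a : Int) (b : Int) : Int := a * 10 + b

-- the `for i in range(len(number))` loop over the digit cells: at each cell run the while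
-- loop, append its count, and either push the carry into the next cell or (last cell)
-- record the remainder.  Returns (quotient_array, remainder).
def pvLoopA (nb : Int) : List Int → List Int × Int
  | [] => ([], 0)
  | [d] =>
      let p := pvWhileA d nb
      ([p.2], p.1)
  | d :: d2 :: rest =>
      let p := pvWhileA d nb
      let r := pvLoopA nb (pvConcatInt p.1 d2 :: rest)
      (p.2 :: r.1, r.2)
termination_by ds => ds.length
decreasing_by simp

def quotient_remainder (number : Int) (new_base : Int) : Int × Int :=
  let digits := (PySem.Int.toStr number).toList.map pvDigitInt
  let r := pvLoopA new_base digits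
  (r.1.foldl (fun q c => q * 10 + c) 0, r.2)

-- ===== PORT B =====

def quotient_remainder_alt (number : Int) (new_base : Int) : Int × Int :=
  let value := (PySem.Int.toStr number).toList.foldl (fun v c => v * 10 + pvDigitInt c) 0
  (PySem.Int.divmod? value new_base).getD (0, 0)

-- ===== PRECONDITION & SPEC =====
-- Pre_ excludes exactly the inputs on which Python A does not return: number < 0, where
-- both Pythons raise ValueError (int('-')), and new_base ≤ 0, where A's while loop diverges.
def Pre_quotient_remainder (number : Int) (new_base : Int) : Prop :=
  0 ≤ number ∧ 1 ≤ new_base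
instance (number : Int) (new_base : Int) : Decidable (Pre_quotient_remainder number new_base) := by unfold Pre_quotient_remainder; infer_instance

def pvWitness_quotient_remainder : Int × Int := (1234, 7)

def Spec_quotient_remainder (number : Int) (new_base : Int) (out : Int × Int) : Prop := out = quotient_remainder_alt number new_base
instance (number : Int) (new_base : Int) (out : Int × Int) : Decidable (Spec_quotient_remainder number new_base out) := by unfold Spec_quotient_remainder; infer_instance

-- ===== CLAIM (what is proved, stated in full; the proofs are below) =====
def Claim_equal_quotient_remainder : Prop := ∀ (number : Int) (new_base : Int), Dom_quotient_remainder number new_base → Pre_quotient_remainder number new_base → Spec_quotient_remainder number new_base (quotient_remainder number new_base)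

-- ===== LEMMAS AND PROOFS =====

def pvDigitsOf (m : Nat) : List Nat :=
  if h : m < 10 then [m] else pvDigitsOf (m / 10) ++ [m % 10]
termination_by m
decreasing_by exact Nat.div_lt_self (by omega) (by omega)

lemma pvDigitsOf_ge (m : Nat) (h : ¬ m < 10) :
    pvDigitsOf m = pvDigitsOf (m / 10) ++ [m % 10] := by
  conv_lhs => rw [pvDigitsOf]
  simp [h]

lemma pvToDigitsCore_eq (f : Nat) : ∀ (m : Nat) (l : List Char), m < f →
    Nat.toDigitsCore 10 f m l = (pvDigitsOf m).map Nat.digitChar ++ l := by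
  induction f with
  | zero => intro m l h; omega
  | succ f ih =>
    intro m l h
    rw [Nat.toDigitsCore]
    by_cases h10 : m / 10 = 0
    · simp only [h10, if_pos]
      rw [pvDigitsOf]
      have : m < 10 := by omega
      simp [this, Nat.mod_eq_of_lt this]
    · rw [if_neg h10, ih (m / 10) _ (by omega)]
      rw [pvDigitsOf_ge m (by omega)]
      simp

lemma pvDigitsOf_lt (m : Nat) : ∀ d ∈ pvDigitsOf m, d < 10 := by
  induction m using pvDigitsOf.induct with
  | case1 m h => rw [pvDigitsOf]; simp [h]
  | case2 m h ih =>
    rw [pvDigitsOf]; simp only [dif_neg h, List.mem_append, List.mem_singleton]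
    rintro d (hd | rfl)
    · exact ih d hd
    · omega

lemma pvFoldl_add (ds : List Int) : ∀ (v c : Int),
    ds.foldl (fun v d => v * 10 + d) (v + c) =
      ds.foldl (fun v d => v * 10 + d) v + c * 10 ^ ds.length := by
  induction ds with
  | nil => intro v c; simp
  | cons d ds ih =>
    intro v c
    simp only [List.foldl_cons, List.length_cons]
    have : (v + c) * 10 + d = (v * 10 + d) + c * 10 := by ring
    rw [this, ih]
    ring

lemma pvRoundtrip (m : Nat) :
    ((pvDigitsOf m).map Int.ofNat).foldl (fun v d => v * 10 + d) 0 = (m : Int) := by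
  induction m using pvDigitsOf.induct with
  | case1 m h => rw [pvDigitsOf]; simp [h]
  | case2 m h ih =>
    rw [pvDigitsOf_ge m h]
    simp only [List.map_append, List.foldl_append, ih, List.map_cons, List.map_nil,
      List.foldl_cons, List.foldl_nil]
    push_cast [Int.ofNat_eq_natCast]
    omega

lemma pvToChars_eq (n : Int) (h : 0 ≤ n) :
    PySem.Int.toChars n = (pvDigitsOf n.toNat).map Nat.digitChar := by
  rw [PySem.Int.toChars, if_neg (by omega)]
  rw [Nat.toDigits, pvToDigitsCore_eq (n.toNat + 1) n.toNat [] (by omega)]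
  simp

lemma pvDigitInt_digitChar (d : Nat) (h : d < 10) : pvDigitInt (Nat.digitChar d) = Int.ofNat d := by
  interval_cases d <;> decide

lemma pvFmodPos (a b : Int) (hb : 0 < b) : a.fmod b = a % b := by
  rw [Int.fmod_eq_emod]; simp [Int.le_of_lt hb]

lemma pvFdivPos (a b : Int) (hb : 0 < b) : a.fdiv b = a / b := by
  rw [Int.fdiv_eq_ediv]; simp [Int.le_of_lt hb]

lemma pvWhileA_spec (v nb : Int) (hv : 0 ≤ v) (hnb : 0 < nb) :
    pvWhileA v nb = (v.fmod nb, v.fdiv nb) := by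
  rw [pvWhileA]
  by_cases hc : nb ≤ v
  · rw [dif_pos ⟨hc, hnb⟩, pvWhileA_spec (v - nb) nb (by omega) hnb]
    have h1 : (v - nb).fmod nb = v.fmod nb := by
      rw [pvFmodPos _ _ hnb, pvFmodPos _ _ hnb, Int.sub_emod_right]
    have h2 : (v - nb).fdiv nb + 1 = v.fdiv nb := by
      rw [pvFdivPos _ _ hnb, pvFdivPos _ _ hnb]
      have h3 := Int.add_mul_ediv_right v (-1) (show nb ≠ 0 by omega)
      rw [show v + -1 * nb = v - nb by ring] at h3
      omega
    simp [h1, h2]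
  · rw [dif_neg (by omega)]
    have h1 : v.fmod nb = v := by
      rw [pvFmodPos _ _ hnb]
      exact Int.emod_eq_of_lt hv (by omega)
    have h2 : v.fdiv nb = 0 := by
      rw [pvFdivPos _ _ hnb]
      exact Int.ediv_eq_zero_of_lt hv (by omega)
    simp [h1, h2]
termination_by v.toNat
decreasing_by omega

lemma pvLoopA_len (nb : Int) (ds : List Int) : ∀ d, ((pvLoopA nb (d :: ds)).1).length = ds.length + 1 := by
  induction ds with
  | nil => intro d; simp [pvLoopA]
  | cons d2 rest ih =>
    intro d
    rw [pvLoopA]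
    simp [ih]

lemma pvLoopA_spec (nb : Int) (hnb : 0 < nb) (ds : List Int) : ∀ v, 0 ≤ v → (∀ d ∈ ds, 0 ≤ d) →
    ((pvLoopA nb (v :: ds)).1.foldl (fun q c => q * 10 + c) 0
        = (ds.foldl (fun v d => v * 10 + d) v).fdiv nb) ∧
    ((pvLoopA nb (v :: ds)).2 = (ds.foldl (fun v d => v * 10 + d) v).fmod nb) := by
  induction ds with
  | nil =>
    intro v hv _
    rw [pvLoopA]
    simp [pvWhileA_spec v nb hv hnb]
  | cons d rest ih =>
    intro v hv hds
    rw [pvLoopA]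
    simp only [pvWhileA_spec v nb hv hnb]
    have hd : (0:Int) ≤ d := hds d (by simp)
    have hmodnn : 0 ≤ v.fmod nb := by
      rw [pvFmodPos _ _ hnb]; exact Int.emod_nonneg v (by omega)
    have hv' : 0 ≤ pvConcatInt (v.fmod nb) d := by
      unfold pvConcatInt; omega
    obtain ⟨ih1, ih2⟩ := ih (pvConcatInt (v.fmod nb) d) hv' (fun x hx => hds x (by simp [hx]))
    -- value bookkeeping
    have hsplit : (v * 10 + d) = pvConcatInt (v.fmod nb) d + (v.fdiv nb * 10) * nb := by
      unfold pvConcatInt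
      rw [pvFmodPos _ _ hnb, pvFdivPos _ _ hnb]
      linear_combination -10 * (Int.mul_ediv_add_emod v nb)
    have hval : rest.foldl (fun v d => v * 10 + d) (v * 10 + d)
        = rest.foldl (fun v d => v * 10 + d) (pvConcatInt (v.fmod nb) d)
          + (v.fdiv nb * 10 * nb) * 10 ^ rest.length := by
      rw [hsplit, pvFoldl_add rest (pvConcatInt (v.fmod nb) d) ((v.fdiv nb * 10) * nb)]
    constructor
    · simp only [List.foldl_cons]
      rw [show ((0:Int) * 10 + v.fdiv nb) = 0 + v.fdiv nb by ring,
        pvFoldl_add _ 0 (v.fdiv nb), ih1, pvLoopA_len, hval]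
      generalize rest.foldl (fun v d => v * 10 + d) (pvConcatInt (v.fmod nb) d) = X
      generalize rest.length = L
      generalize v.fdiv nb = k
      rw [pvFdivPos X nb hnb,
        show X + k * 10 * nb * 10 ^ L = X + (k * 10 ^ (L + 1)) * nb by ring,
        pvFdivPos (X + (k * 10 ^ (L + 1)) * nb) nb hnb,
        Int.add_mul_ediv_right _ _ (show nb ≠ 0 by omega)]
    · simp only [List.foldl_cons]
      rw [ih2, hval]
      generalize rest.foldl (fun v d => v * 10 + d) (pvConcatInt (v.fmod nb) d) = X
      generalize rest.length = L
      generalize v.fdiv nb = k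
      rw [pvFmodPos X nb hnb,
        show X + k * 10 * nb * 10 ^ L = X + (k * 10 ^ (L + 1)) * nb by ring,
        pvFmodPos (X + (k * 10 ^ (L + 1)) * nb) nb hnb, Int.add_mul_emod_self_right]

lemma pvDigitsOf_ne_nil (m : Nat) : pvDigitsOf m ≠ [] := by
  rw [pvDigitsOf]; split <;> simp

lemma pvMain (number new_base : Int) (hn : 0 ≤ number) (hb : 1 ≤ new_base) :
    quotient_remainder number new_base = quotient_remainder_alt number new_base := by
  have hchars : (PySem.Int.toStr number).toList = (pvDigitsOf number.toNat).map Nat.digitChar := by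
    rw [PySem.Int.toList_toStr, pvToChars_eq number hn]
  cases hE : pvDigitsOf number.toNat with
  | nil => exact absurd hE (pvDigitsOf_ne_nil _)
  | cons d0 dtl =>
    have hds : (List.map Nat.digitChar (d0 :: dtl)).map pvDigitInt
        = List.map Int.ofNat (d0 :: dtl) := by
      rw [List.map_map]
      apply List.map_congr_left
      intro d hd
      apply pvDigitInt_digitChar
      apply pvDigitsOf_lt number.toNat
      rw [hE]; exact hd
    have hV : (List.map Int.ofNat dtl).foldl (fun v d => v * 10 + d) (Int.ofNat d0) = number := by
      have h := pvRoundtrip number.toNat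
      rw [hE] at h
      simp only [List.map_cons, List.foldl_cons, zero_mul, zero_add] at h
      rw [h, Int.toNat_of_nonneg hn]
    have hvalue : (List.map Nat.digitChar (d0 :: dtl)).foldl
        (fun v c => v * 10 + pvDigitInt c) 0 = number := by
      rw [← List.foldl_map, hds]
      simp only [List.map_cons, List.foldl_cons, zero_mul, zero_add]
      exact hV
    have hspec := pvLoopA_spec new_base (by omega) (List.map Int.ofNat dtl) (Int.ofNat d0)
      (Int.ofNat_zero_le d0)
      (by intro d hd; simp at hd; obtain ⟨a, _, rfl⟩ := hd; exact Int.ofNat_zero_le a)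
    rw [hV] at hspec
    unfold quotient_remainder quotient_remainder_alt
    rw [hchars, hE, hds, hvalue]
    simp only [PySem.Int.divmod?]
    rw [if_neg (show ¬ new_base = 0 by omega)]
    simp only [Option.getD_some, List.map_cons]
    exact Prod.ext (hspec.1) (hspec.2)

-- ===== VERDICT (by name: the statement is the Claim_ definition above) =====
theorem quotient_remainder_spec : Claim_equal_quotient_remainder := by
  intro number new_base _hdom hpre
  unfold Spec_quotient_remainder
  exact pvMain number new_base hpre.1 hpre.2
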